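-- pv_equiv track=rewrite | github.com/beuss-git/bachelor-oppgave-nina | app/core/core.py | __detected_frames_to_range
-- ===== SOURCE A (Python) =====
-- from typing import List, Tuple
--
-- def __detected_frames_to_range(
--     frames: List[int], frame_buffer: int
-- ) -> List[Tuple[int, int]]:
--     """Convert a list of detected frames to a list of ranges.
--         Due to detection inaccuracies we need to allow for some dead frames
--         without detections within a valid range.
--
--     Args:
--         frames: A list of detected frames.
--         frame_buffer: The number of frames we allow to be without detection
--                       before we consider it a new range.
--     """
--
--     if len(frames) == 0:
--         return []
--
--     frame_ranges: List[Tuple[int, int]] = []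
--     start_frame = frames[0]
--     end_frame = frames[0]
--
--     for frame in frames[1:]:
--         if frame <= end_frame + frame_buffer:
--             # Extend the range
--             end_frame = frame
--         else:
--             # Start a new range
--             frame_ranges.append((start_frame, end_frame))
--             start_frame = frame
--             end_frame = frame
--
--     # Add the last range
--     frame_ranges.append((start_frame, end_frame))
--
--     return frame_ranges
-- ===== SOURCE B (Python) =====
-- from typing import List, Tuple
--
-- def __detected_frames_to_range(
--     frames: List[int], frame_buffer: int
-- ) -> List[Tuple[int, int]]:
--     # Staged decomposition: (1) compute a break flag for every adjacent pair,
--     # (2) materialize the explicit list of segments, cutting at flagged pairs,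
--     # (3) map each segment to its (first, last) endpoints.
--     if not frames:
--         return []
--     flags = [b > a + frame_buffer for a, b in zip(frames, frames[1:])]
--     segments = [[frames[0]]]
--     for brk, f in zip(flags, frames[1:]):
--         if brk:
--             segments.append([f])
--         else:
--             segments[-1].append(f)
--     return [(seg[0], seg[-1]) for seg in segments]
-- ===== Notes on version B (the rewrite author's own statement) =====
-- stated objective: alternative
-- what changed: Replaces A's single stateful pass (running start/end with flush-on-gap) by three staged passes: break flags for every adjacent pair via zip, an explicit list-of-lists of segments cut at flagged pairs, then a map taking each segment to its (first, last) endpoints.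
import Mathlib
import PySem

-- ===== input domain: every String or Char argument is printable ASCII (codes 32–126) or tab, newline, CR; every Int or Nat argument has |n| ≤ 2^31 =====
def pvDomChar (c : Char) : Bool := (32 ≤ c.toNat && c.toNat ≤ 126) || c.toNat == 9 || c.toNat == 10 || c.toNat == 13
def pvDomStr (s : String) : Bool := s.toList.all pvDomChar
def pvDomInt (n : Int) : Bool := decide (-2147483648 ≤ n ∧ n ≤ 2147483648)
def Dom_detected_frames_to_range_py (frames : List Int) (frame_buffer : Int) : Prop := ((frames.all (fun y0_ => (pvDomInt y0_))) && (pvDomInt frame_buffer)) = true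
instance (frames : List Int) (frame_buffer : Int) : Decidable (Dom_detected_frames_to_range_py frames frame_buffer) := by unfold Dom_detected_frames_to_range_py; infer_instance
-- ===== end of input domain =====

-- B replaces A's single stateful pass by three staged passes (adjacent-pair break
-- flags, explicit segment lists, endpoint map); same cost, alternative structure.
-- Proven equal on all inputs.


-- ===== PORT A =====
-- A: one fold over frames[1:] carrying (frame_ranges, start_frame, end_frame),
-- flushing (start, end) to the accumulator whenever the gap exceeds the buffer.
def detected_frames_to_range_py (frames : List Int) (frame_buffer : Int) : List (Int × Int) :=
  match frames with
  | [] => []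
  | f0 :: rest =>
    let st := rest.foldl
      (fun (acc : List (Int × Int) × Int × Int) frame =>
        if frame ≤ acc.2.2 + frame_buffer then
          (acc.1, acc.2.1, frame)
        else
          (acc.1 ++ [(acc.2.1, acc.2.2)], frame, frame))
      ([], f0, f0)
    st.1 ++ [(st.2.1, st.2.2)]

-- ===== PORT B =====
-- B: (1) break flags per adjacent pair (zip(frames, frames[1:])); (2) explicit
-- list of segments, a flagged pair starting a fresh segment, an unflagged frame
-- appended to the last segment (segments[-1].append(f) becomes
-- dropLast ++ [last ++ [f]]); (3) map each segment to (seg[0], seg[-1]).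
-- Segments are always nonempty, so seg[0]/seg[-1] are exactly headD 0/getLastD 0.
def detected_frames_to_range_py_alt (frames : List Int) (frame_buffer : Int) : List (Int × Int) :=
  match frames with
  | [] => []
  | f0 :: rest =>
    let flags := ((f0 :: rest).zip rest).map (fun p => decide (p.2 > p.1 + frame_buffer))
    let segments := (flags.zip rest).foldl
      (fun (segs : List (List Int)) p =>
        if p.1 then segs ++ [[p.2]]
        else segs.dropLast ++ [segs.getLastD [] ++ [p.2]])
      [[f0]]
    segments.map (fun seg => (seg.headD 0, seg.getLastD 0))

-- ===== PRECONDITION & SPEC =====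
def Spec_detected_frames_to_range_py (frames : List Int) (frame_buffer : Int) (out : List (Int × Int)) : Prop := out = detected_frames_to_range_py_alt frames frame_buffer
instance (frames : List Int) (frame_buffer : Int) (out : List (Int × Int)) : Decidable (Spec_detected_frames_to_range_py frames frame_buffer out) := by unfold Spec_detected_frames_to_range_py; infer_instance

-- ===== CLAIM (what is proved, stated in full; the proofs are below) =====
def Claim_equal_detected_frames_to_range_py : Prop := ∀ (frames : List Int) (frame_buffer : Int), Dom_detected_frames_to_range_py frames frame_buffer → Spec_detected_frames_to_range_py frames frame_buffer (detected_frames_to_range_py frames frame_buffer)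

-- ===== LEMMAS AND PROOFS =====

-- headD of a right-extension of a nonempty list is unchanged.
theorem pv_headD_concat {l : List Int} (h : l ≠ []) (x : Int) :
    (l ++ [x]).headD 0 = l.headD 0 := by
  cases l with
  | nil => exact absurd rfl h
  | cons a t => simp

-- Joint loop invariant: running A's fold from (acc, s, prev) and B's fold from
-- init ++ [lastseg] over the same remaining frames produces the same ranges,
-- provided lastseg is the open segment (head s, last prev) and init maps to acc.
theorem pv_main (frame_buffer : Int) (rest : List Int) :
    ∀ (acc : List (Int × Int)) (s prev : Int) (init : List (List Int)) (lastseg : List Int),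
      lastseg ≠ [] → lastseg.headD 0 = s → lastseg.getLastD 0 = prev →
      init.map (fun seg => (seg.headD 0, seg.getLastD 0)) = acc →
      ((rest.foldl
          (fun (acc : List (Int × Int) × Int × Int) frame =>
            if frame ≤ acc.2.2 + frame_buffer then
              (acc.1, acc.2.1, frame)
            else
              (acc.1 ++ [(acc.2.1, acc.2.2)], frame, frame))
          (acc, s, prev)).1 ++
        [((rest.foldl
          (fun (acc : List (Int × Int) × Int × Int) frame =>
            if frame ≤ acc.2.2 + frame_buffer then
              (acc.1, acc.2.1, frame)
            else
              (acc.1 ++ [(acc.2.1, acc.2.2)], frame, frame))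
          (acc, s, prev)).2.1,
          (rest.foldl
          (fun (acc : List (Int × Int) × Int × Int) frame =>
            if frame ≤ acc.2.2 + frame_buffer then
              (acc.1, acc.2.1, frame)
            else
              (acc.1 ++ [(acc.2.1, acc.2.2)], frame, frame))
          (acc, s, prev)).2.2)]) =
      (((((prev :: rest).zip rest).map (fun p => decide (p.2 > p.1 + frame_buffer))).zip rest).foldl
          (fun (segs : List (List Int)) p =>
            if p.1 then segs ++ [[p.2]]
            else segs.dropLast ++ [segs.getLastD [] ++ [p.2]])
          (init ++ [lastseg])).map (fun seg => (seg.headD 0, seg.getLastD 0)) := by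
  induction rest with
  | nil =>
    intro acc s prev init lastseg hne hh hl hi
    simp only [List.zip_nil_right, List.map_nil, List.foldl_nil,
      List.map_append, List.map_cons, hi, hh, hl]
  | cons f rest ih =>
    intro acc s prev init lastseg hne hh hl hi
    have hz : ((((prev :: f :: rest).zip (f :: rest)).map (fun p => decide (p.2 > p.1 + frame_buffer))).zip (f :: rest)) =
        (decide (f > prev + frame_buffer), f) ::
        ((((f :: rest).zip rest).map (fun p => decide (p.2 > p.1 + frame_buffer))).zip rest) := by
      simp [List.zip]
    rw [hz]
    simp only [List.foldl_cons]
    by_cases h : f ≤ prev + frame_buffer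
    · have hng : ¬ f > prev + frame_buffer := not_lt.mpr h
      rw [if_pos h, if_neg (by simpa using hng)]
      have hdrop : (init ++ [lastseg]).dropLast ++ [(init ++ [lastseg]).getLastD [] ++ [f]] =
          init ++ [lastseg ++ [f]] := by
        simp
      rw [hdrop]
      exact ih acc s f init (lastseg ++ [f]) (by simp)
        (by rw [pv_headD_concat hne]; exact hh) (by simp) hi
    · have hg : f > prev + frame_buffer := lt_of_not_ge h
      rw [if_neg h, if_pos (by simpa using hg)]
      refine ih (acc ++ [(s, prev)]) f f (init ++ [lastseg]) [f] (by simp) (by simp) (by simp) ?_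
      simp only [List.map_append, List.map_cons, List.map_nil, hi]
      rw [hh, hl]

-- ===== VERDICT (by name: the statement is the Claim_ definition above) =====
theorem detected_frames_to_range_py_spec : Claim_equal_detected_frames_to_range_py := by
  intro frames frame_buffer _
  unfold Spec_detected_frames_to_range_py
  cases frames with
  | nil => simp [detected_frames_to_range_py, detected_frames_to_range_py_alt]
  | cons f0 rest =>
    show _ = (((((f0 :: rest).zip rest).map (fun p => decide (p.2 > p.1 + frame_buffer))).zip rest).foldl
          (fun (segs : List (List Int)) p =>
            if p.1 then segs ++ [[p.2]]
            else segs.dropLast ++ [segs.getLastD [] ++ [p.2]])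
          [[f0]]).map (fun seg => (seg.headD 0, seg.getLastD 0))
    have := pv_main frame_buffer rest [] f0 f0 [] [f0] (by simp) (by simp) (by simp) (by simp)
    simpa using this
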